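-- pv_equiv track=rewrite | github.com/DhrithiMV/DSA-dhrithiMV | 6_Selection_Sort/6.3_Find_the_Array_K-th_Selection_Sort_Swap/main.py | kthSwapSelectionSort
-- ===== SOURCE A (Python) =====
-- def kthSwapSelectionSort(nums, k):
--     swaps = 0
--     for i in range(len(nums)):
--         min_idx = i
--         for j in range(i+1, len(nums)):
--             if nums[j] < nums[min_idx]:
--                 min_idx = j
--         if min_idx != i:
--             nums[i], nums[min_idx] = nums[min_idx], nums[i]
--             swaps += 1
--             if swaps == k:
--                 return nums
--     return nums
-- ===== SOURCE B (Python) =====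
-- def kthSwapSelectionSort(nums, k):
--     # Rebuild the selection-sorted prefix front-to-back: at each step take the
--     # minimum of the remaining suffix (min/index are single C-level passes),
--     # count a swap only when the suffix head is not already that minimum.
--     # Like A, mutates nums in place and returns it.
--     res = []
--     rest = list(nums)
--     s = 0
--     while rest:
--         m = min(rest)
--         if rest[0] == m:
--             res.append(m)
--             rest.pop(0)
--         else:
--             j = rest.index(m)
--             rest[j] = rest[0]
--             rest.pop(0)
--             res.append(m)
--             s += 1
--             if s == k:
--                 break
--     res += rest
--     nums[:] = res
--     return nums
-- ===== Notes on version B (the rewrite author's own statement) =====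
-- stated objective: alternative
-- what changed: Replaces the index-based double loop over the array with a front-to-back rebuild: a sorted prefix list plus a shrinking suffix, where each step takes min(rest)/rest.index(m) (single C-level passes) instead of a hand-written inner scan, counting a swap when the suffix head is not the minimum.
import Mathlib
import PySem

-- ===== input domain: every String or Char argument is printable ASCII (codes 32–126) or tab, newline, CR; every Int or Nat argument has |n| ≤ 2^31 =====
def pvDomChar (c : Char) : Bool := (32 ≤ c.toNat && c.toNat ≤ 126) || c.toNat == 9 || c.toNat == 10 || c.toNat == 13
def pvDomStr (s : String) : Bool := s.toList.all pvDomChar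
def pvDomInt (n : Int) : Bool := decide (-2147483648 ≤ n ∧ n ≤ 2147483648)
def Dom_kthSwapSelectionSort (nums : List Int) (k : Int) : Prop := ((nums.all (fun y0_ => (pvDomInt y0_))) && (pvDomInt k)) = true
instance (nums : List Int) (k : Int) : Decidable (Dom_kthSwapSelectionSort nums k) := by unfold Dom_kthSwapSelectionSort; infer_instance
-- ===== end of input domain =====

-- B rebuilds the array front-to-back from a sorted prefix and a shrinking suffix
-- (min/index passes) instead of A's index-based double loop; equal return value
-- everywhere (both Pythons also mutate `nums` to the same final content).


-- ===== PORT A =====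
-- A's outer `for i in range(len(nums))` with early return, on the current array;
-- the inner `for j in range(i+1, len(nums))` is the foldl over that index range.
-- All indices are provably in range, so list indexing is `getD _ 0`.
def kthSwapSelectionSortGo (nums : List Int) (k : Int) (i : Nat) (swaps : Int) : List Int :=
  if _h : i < nums.length then
    -- Python's local `min_idx` (inner j-loop), written out at each use site
    if ((List.range' (i+1) (nums.length - (i+1))).foldl
          (fun m j => if nums.getD j 0 < nums.getD m 0 then j else m) i) ≠ i then
      -- nums[i], nums[min_idx] = nums[min_idx], nums[i]
      if swaps + 1 = k then
        (nums.set i (nums.getD ((List.range' (i+1) (nums.length - (i+1))).foldl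
            (fun m j => if nums.getD j 0 < nums.getD m 0 then j else m) i) 0)).set
          ((List.range' (i+1) (nums.length - (i+1))).foldl
            (fun m j => if nums.getD j 0 < nums.getD m 0 then j else m) i) (nums.getD i 0)
      else kthSwapSelectionSortGo
        ((nums.set i (nums.getD ((List.range' (i+1) (nums.length - (i+1))).foldl
            (fun m j => if nums.getD j 0 < nums.getD m 0 then j else m) i) 0)).set
          ((List.range' (i+1) (nums.length - (i+1))).foldl
            (fun m j => if nums.getD j 0 < nums.getD m 0 then j else m) i) (nums.getD i 0))
        k (i+1) (swaps+1)
    else kthSwapSelectionSortGo nums k (i+1) swaps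
  else nums
termination_by nums.length - i
decreasing_by
  · simp only [List.length_set]; omega
  · omega

def kthSwapSelectionSort (nums : List Int) (k : Int) : List Int :=
  kthSwapSelectionSortGo nums k 0 0

-- ===== PORT B =====
-- B's `while rest:` loop: `res` is the sorted prefix, `rest` the remaining suffix;
-- `min(rest)` is the foldl of `min`, `rest.index(m)` is `idxOf`,
-- `rest[j] = rest[0]; rest.pop(0)` is `set` then `tail`; `break` returns res ++ rest.
def kthSwapSelectionSortAltGo (res rest : List Int) (k : Int) (s : Int) : List Int :=
  match rest with
  | [] => res ++ []
  | x :: xs =>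
    -- m = min(rest); rest.index(m); rest[j] = rest[0]; rest.pop(0) — locals written out
    if x = xs.foldl min x then kthSwapSelectionSortAltGo (res ++ [xs.foldl min x]) xs k s
    else
      if s + 1 = k then
        (res ++ [xs.foldl min x]) ++ ((x :: xs).set ((x :: xs).idxOf (xs.foldl min x)) x).tail
      else kthSwapSelectionSortAltGo (res ++ [xs.foldl min x])
        (((x :: xs).set ((x :: xs).idxOf (xs.foldl min x)) x).tail) k (s+1)
termination_by rest.length
decreasing_by
  · simp
  · simp [List.length_set]

def kthSwapSelectionSort_alt (nums : List Int) (k : Int) : List Int :=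
  kthSwapSelectionSortAltGo [] nums k 0

-- ===== PRECONDITION & SPEC =====
def Spec_kthSwapSelectionSort (nums : List Int) (k : Int) (out : List Int) : Prop := out = kthSwapSelectionSort_alt nums k
instance (nums : List Int) (k : Int) (out : List Int) : Decidable (Spec_kthSwapSelectionSort nums k out) := by unfold Spec_kthSwapSelectionSort; infer_instance

-- ===== CLAIM (what is proved, stated in full; the proofs are below) =====
def Claim_equal_kthSwapSelectionSort : Prop := ∀ (nums : List Int) (k : Int), Dom_kthSwapSelectionSort nums k → Spec_kthSwapSelectionSort nums k (kthSwapSelectionSort nums k)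

-- ===== LEMMAS AND PROOFS =====

theorem foldl_min_le (xs : List Int) (v : Int) : xs.foldl min v ≤ v := by
  induction xs generalizing v with
  | nil => simp
  | cons y ys ih =>
    simpa using le_trans (ih (min v y)) (min_le_left _ _)

theorem foldl_min_mem (xs : List Int) (v : Int) :
    xs.foldl min v = v ∨ xs.foldl min v ∈ xs := by
  induction xs generalizing v with
  | nil => left; rfl
  | cons y ys ih =>
    rcases ih (min v y) with h | h
    · rcases le_total v y with hv | hv
      · left; simpa [min_eq_left hv] using h
      · right
        have h' : List.foldl min y ys = y := by simpa [min_eq_right hv] using h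
        simp [List.foldl_cons, min_eq_right hv, h']
    · right; exact List.mem_cons_of_mem _ (by simpa using h)

theorem getD_append_len (res l : List Int) (t : Nat) :
    (res ++ l).getD (res.length + t) 0 = l.getD t 0 := by
  induction res with
  | nil => simp
  | cons a rs ih =>
    have : (a :: rs).length + t = (rs.length + t) + 1 := by simp; omega
    rw [this]
    simpa [List.getD_cons_succ] using ih

theorem set_append_len (res l : List Int) (t : Nat) (a : Int) :
    (res ++ l).set (res.length + t) a = res ++ l.set t a := by
  rw [List.set_append]
  simp

theorem getD_idxOf (xs : List Int) (m : Int) (h : m ∈ xs) :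
    xs.getD (xs.idxOf m) 0 = m := by
  have hl : xs.idxOf m < xs.length := List.idxOf_lt_length_of_mem h
  rw [List.getD_eq_getElem?_getD, List.getElem?_eq_getElem hl]
  simp [List.getElem_idxOf hl]

-- The inner scan of A: a left fold over the index range, starting from current
-- best index b (value v), characterised by the minimum of the scanned suffix.
theorem fold_min_idx :
    ∀ (xs nums : List Int) (off b : Nat) (v : Int),
      (∀ t, t < xs.length → nums.getD (off + t) 0 = xs.getD t 0) →
      nums.getD b 0 = v →
      (List.range' off xs.length).foldl
          (fun m j => if nums.getD j 0 < nums.getD m 0 then j else m) b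
        = if xs.foldl min v < v then off + xs.idxOf (xs.foldl min v) else b := by
  intro xs
  induction xs with
  | nil => intro nums off b v _ _; simp
  | cons y ys ih =>
    intro nums off b v hget hb
    have hy : nums.getD off 0 = y := by simpa using hget 0 (by simp)
    have hget' : ∀ t, t < ys.length → nums.getD (off + 1 + t) 0 = ys.getD t 0 := by
      intro t ht
      have := hget (t+1) (by simp; omega)
      calc nums.getD (off + 1 + t) 0 = nums.getD (off + (t+1)) 0 := by ring_nf
        _ = (y :: ys).getD (t+1) 0 := this
        _ = ys.getD t 0 := List.getD_cons_succ
    simp only [List.length_cons]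
    rw [List.range'_succ, List.foldl_cons]
    by_cases hlt : y < v
    · -- best index jumps to off, best value y
      have step : (if nums.getD off 0 < nums.getD b 0 then off else b) = off := by
        rw [hy, hb]; simp [hlt]
      rw [step, ih nums (off+1) off y hget' hy]
      have hminvy : min v y = y := min_eq_right (le_of_lt hlt)
      simp only [List.foldl_cons, hminvy]
      have hcond : List.foldl min y ys < v := lt_of_le_of_lt (foldl_min_le ys y) hlt
      rw [if_pos hcond, List.idxOf_cons]
      by_cases h2 : List.foldl min y ys < y
      · have hne : (y == List.foldl min y ys) = false := by
          simp only [beq_eq_false_iff_ne, ne_eq]; omega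
        rw [if_pos h2]
        simp only [hne, cond_false]
        omega
      · have heq : List.foldl min y ys = y := le_antisymm (foldl_min_le _ _) (by omega)
        rw [if_neg h2]
        simp [heq]
    · -- best index stays b, best value v
      have step : (if nums.getD off 0 < nums.getD b 0 then off else b) = b := by
        rw [hy, hb]; simp [hlt]
      rw [step, ih nums (off+1) b v hget' hb]
      have hminvy : min v y = v := min_eq_left (by omega)
      simp only [List.foldl_cons, hminvy]
      by_cases h2 : List.foldl min v ys < v
      · have hne : (y == List.foldl min v ys) = false := by
          simp only [beq_eq_false_iff_ne, ne_eq]; omega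
        rw [if_pos h2, if_pos h2, List.idxOf_cons]
        simp only [hne, cond_false]
        omega
      · rw [if_neg h2, if_neg h2]

-- Main invariant: A's loop from position res.length on res ++ rest equals
-- B's loop with prefix res and suffix rest.
theorem go_eq : ∀ (n : Nat) (rest res : List Int) (k s : Int), rest.length = n →
    kthSwapSelectionSortGo (res ++ rest) k res.length s
      = kthSwapSelectionSortAltGo res rest k s := by
  intro n
  induction n using Nat.strong_induction_on with
  | _ n ih =>
    intro rest res k s hn
    match rest with
    | [] =>
      rw [kthSwapSelectionSortGo, kthSwapSelectionSortAltGo]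
      simp
    | x :: xs =>
      simp only [List.length_cons] at hn
      have hlen : res.length < (res ++ x :: xs).length := by simp
      rw [kthSwapSelectionSortGo, dif_pos hlen]
      have hcnt : (res ++ x :: xs).length - (res.length + 1) = xs.length := by
        simp only [List.length_append, List.length_cons]; omega
      have hget : ∀ t, t < xs.length →
          (res ++ x :: xs).getD (res.length + 1 + t) 0 = xs.getD t 0 := by
        intro t ht
        have : res.length + 1 + t = res.length + (t + 1) := by omega
        rw [this, getD_append_len]
        exact List.getD_cons_succ
      have hx : (res ++ x :: xs).getD res.length 0 = x := by
        have := getD_append_len res (x :: xs) 0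
        simp only [Nat.add_zero] at this
        rw [this]; rfl
      rw [hcnt, fold_min_idx xs (res ++ x :: xs) (res.length + 1) res.length x hget hx]
      rw [kthSwapSelectionSortAltGo]
      set M := xs.foldl min x with hMdef
      by_cases hxm : x = M
      · -- no swap at this position: the head is already the minimum
        have hnlt : ¬ M < x := by omega
        rw [if_neg hnlt, if_neg (show ¬ (res.length ≠ res.length) by simp), if_pos hxm]
        rw [← hxm]
        have hra : res ++ x :: xs = (res ++ [x]) ++ xs := by simp
        have hrl : res.length + 1 = (res ++ [x]).length := by simp
        rw [hra, hrl, ih xs.length (by omega) xs (res ++ [x]) k s rfl]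
      · -- swap: the minimum M sits at offset 1 + j' in the suffix
        have hMx : M < x := lt_of_le_of_ne (foldl_min_le xs x) (Ne.symm hxm)
        have hMmem : M ∈ xs := by
          rcases foldl_min_mem xs x with h | h
          · exact absurd h.symm hxm
          · exact h
        set j' := xs.idxOf M with hj'
        have hsel : (if M < x then res.length + 1 + j' else res.length)
            = res.length + 1 + j' := if_pos hMx
        rw [hsel]
        have hne : res.length + 1 + j' ≠ res.length := by omega
        rw [if_pos hne, if_neg hxm]
        have hj'lt : j' < xs.length := List.idxOf_lt_length_of_mem hMmem
        have hgb : (res ++ x :: xs).getD (res.length + 1 + j') 0 = M := by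
          rw [hget j' hj'lt, getD_idxOf xs M hMmem]
        rw [hgb, hx]
        -- the swapped array, as prefix ++ suffix
        have hset : ((res ++ x :: xs).set res.length M).set (res.length + 1 + j') x
            = (res ++ [M]) ++ xs.set j' x := by
          have h1 : (res ++ x :: xs).set res.length M = res ++ M :: xs := by
            have := set_append_len res (x :: xs) 0 M
            simp only [Nat.add_zero] at this
            rw [this]; rfl
          rw [h1]
          have h2 : res.length + 1 + j' = res.length + (1 + j') := by omega
          rw [h2, set_append_len]
          have h3 : (M :: xs).set (1 + j') x = M :: xs.set j' x := by
            have : 1 + j' = j' + 1 := by omega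
            rw [this]; rfl
          rw [h3]; simp
        rw [hset]
        -- B's suffix after the swap
        have hjB : (x :: xs).idxOf M = j' + 1 := by
          rw [List.idxOf_cons]
          have : (x == M) = false := by simpa using hxm
          simp [this]
          exact hj'.symm
        have hrest' : ((x :: xs).set ((x :: xs).idxOf M) x).tail = xs.set j' x := by
          rw [hjB]; rfl
        rw [hrest']
        by_cases hk : s + 1 = k
        · rw [if_pos hk, if_pos hk]
        · rw [if_neg hk, if_neg hk]
          have hrl : res.length + 1 = (res ++ [M]).length := by simp
          rw [hrl, ih (xs.set j' x).length (by simp only [List.length_set]; omega)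
            (xs.set j' x) (res ++ [M]) k (s+1) rfl]

-- ===== VERDICT (by name: the statement is the Claim_ definition above) =====
theorem kthSwapSelectionSort_spec : Claim_equal_kthSwapSelectionSort := by
  intro nums k _
  unfold Spec_kthSwapSelectionSort kthSwapSelectionSort kthSwapSelectionSort_alt
  have := go_eq nums.length nums [] k 0 rfl
  simpa using this
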